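-- pv_equiv track=rewrite | github.com/tuanphung2005/CTDLGT-Slide-PTIT | code/code-ptit/QUAYLUI-NHANHCAN/DSA02001.py | solve
-- ===== SOURCE A (Python) =====
-- def solve(n, a):
--     res = [a]
--     current = a[:]
--
--     while len(current) > 1:
--         next = [current[i] + current[i+1] for i in range(len(current) - 1)]
--         res.append(next)
--         current = next
--     return res
-- ===== SOURCE B (Python) =====
-- from math import comb
--
-- def solve(n, a):
--     L = len(a)
--     res = [list(a)]
--     for r in range(1, L):
--         coeffs = [comb(r, j) for j in range(r + 1)]
--         res.append([sum(c * x for c, x in zip(coeffs, a[i:i + r + 1]))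
--                     for i in range(L - r)])
--     return res
-- ===== Notes on version B (the rewrite author's own statement) =====
-- stated objective: alternative
-- what changed: Each triangle row is computed directly from the original array as a binomial-weighted sum (Pascal row C(r,0..r) built once per row, then dot products with slices of a), instead of A's row-by-row pairwise-sum iteration.
import Mathlib
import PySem

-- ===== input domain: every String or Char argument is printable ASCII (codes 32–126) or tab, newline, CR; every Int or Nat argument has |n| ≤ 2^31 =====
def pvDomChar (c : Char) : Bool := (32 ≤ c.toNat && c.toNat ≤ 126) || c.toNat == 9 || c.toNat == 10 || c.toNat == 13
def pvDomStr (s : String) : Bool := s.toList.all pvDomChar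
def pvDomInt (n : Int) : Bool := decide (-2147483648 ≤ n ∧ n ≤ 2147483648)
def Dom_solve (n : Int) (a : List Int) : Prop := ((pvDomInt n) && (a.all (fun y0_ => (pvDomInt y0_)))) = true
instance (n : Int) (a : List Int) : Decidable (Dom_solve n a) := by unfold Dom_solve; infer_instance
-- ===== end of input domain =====

-- B computes each triangle row directly from the original array as a binomial-coefficient
-- weighted sum (one Pascal row per output row) instead of A's incremental pairwise-sum loop.

-- ===== PORT A =====
-- next = [current[i] + current[i+1] for i in range(len(current) - 1)]
-- (both indices are in range for every i the comprehension produces, so pyGetD is exact here)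
def pvNext (current : List Int) : List Int :=
  (PySem.List.pyRange 0 ((current.length : Int) - 1) 1).map
    (fun i => PySem.List.pyGetD current i 0 + PySem.List.pyGetD current (i + 1) 0)

-- used by pvLoop's termination proof
theorem pvNext_length (current : List Int) :
    (pvNext current).length = current.length - 1 := by
  simp [pvNext, PySem.List.length_pyRange_one]

-- the while loop of A, accumulating res
def pvLoop (res : List (List Int)) (current : List Int) : List (List Int) :=
  if current.length > 1 then
    pvLoop (res ++ [pvNext current]) (pvNext current)
  else res
termination_by current.length
decreasing_by rw [pvNext_length]; omega

def solve (n : Int) (a : List Int) : List (List Int) :=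
  pvLoop [a] a

-- ===== PORT B =====
-- coeffs = [comb(r, j) for j in range(r + 1)]
def pvCoeffs (r : Nat) : List Int :=
  (List.range (r + 1)).map (fun j => ((r.choose j : Int)))

-- [sum(c * x for c, x in zip(coeffs, a[i:i + r + 1])) for i in range(L - r)]
def pvRowB (a : List Int) (r : Nat) : List Int :=
  (List.range (a.length - r)).map (fun (i : Nat) =>
    (((pvCoeffs r).zip (PySem.List.slice a (some ((i : Int))) (some (((i : Int)) + ((r+1:Nat):Int))))).map
      (fun p => p.1 * p.2)).sum)

-- res = [list(a)]; for r in range(1, L): res.append(row r)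
def solve_alt (n : Int) (a : List Int) : List (List Int) :=
  (List.range' 1 (a.length - 1)).foldl (fun res r => res ++ [pvRowB a r]) [a]

-- ===== PRECONDITION & SPEC =====
def Spec_solve (n : Int) (a : List Int) (out : List (List Int)) : Prop := out = solve_alt n a
instance (n : Int) (a : List Int) (out : List (List Int)) : Decidable (Spec_solve n a out) := by unfold Spec_solve; infer_instance

-- ===== CLAIM (what is proved, stated in full; the proofs are below) =====
def Claim_equal_solve : Prop := ∀ (n : Int) (a : List Int), Dom_solve n a → Spec_solve n a (solve n a)

-- ===== LEMMAS AND PROOFS =====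

-- entry (r, i) of B, as a Finset sum
def pvF (a : List Int) (r i : Nat) : Int :=
  ∑ j ∈ Finset.range (r + 1), ((r.choose j : Int)) * a.getD (i + j) 0

-- row r of B, in index form
def pvRowF (a : List Int) (r : Nat) : List Int :=
  (List.range (a.length - r)).map (fun i => pvF a r i)

theorem pv_sum_map_range (f : Nat → Int) (n : Nat) :
    ((List.range n).map f).sum = ∑ j ∈ Finset.range n, f j := by
  induction n with
  | zero => simp
  | succ n ih => rw [List.range_succ, Finset.sum_range_succ]; simp [ih]

theorem pv_zip_eq (f : Nat → Int) (ys : List Int) (n : Nat) (h : n ≤ ys.length) :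
    ((List.range n).map f).zip ys = (List.range n).map (fun j => (f j, ys.getD j 0)) := by
  apply List.ext_getElem
  · simp; omega
  · intro j h1 h2
    simp at h1
    rw [List.getElem_zip]
    simp [List.getD_eq_getElem?_getD, List.getElem?_eq_getElem (by omega : j < ys.length)]

-- B's zip-of-Pascal-row rows are exactly the binomial sums pvF
theorem pvRowB_eq_F (a : List Int) (r : Nat) : pvRowB a r = pvRowF a r := by
  unfold pvRowB pvRowF
  apply List.map_congr_left
  intro i hi
  simp at hi
  rw [PySem.List.slice_natCast_add]
  have hlen : r + 1 ≤ ((a.drop i).take (r+1)).length := by simp; omega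
  rw [pvCoeffs, pv_zip_eq _ _ _ hlen, List.map_map, pv_sum_map_range]
  unfold pvF
  apply Finset.sum_congr rfl
  intro j hj
  simp at hj
  have h1 : j < ((a.drop i).take (r+1)).length := by omega
  have h2 : i + j < a.length := by omega
  simp only [Function.comp_apply]
  rw [List.getD_eq_getElem?_getD, List.getElem?_eq_getElem h1,
      List.getD_eq_getElem?_getD, List.getElem?_eq_getElem h2]
  simp [List.getElem_take, List.getElem_drop]

theorem pvRowF_length (a : List Int) (r : Nat) :
    (pvRowF a r).length = a.length - r := by simp [pvRowF]

theorem pvRowF_zero (a : List Int) : pvRowF a 0 = a := by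
  unfold pvRowF pvF
  simp
  exact List.ext_getElem (by simp)
    (by intro i h1 h2; simp [List.getElem?_eq_getElem h2])

-- Pascal convolution: the pairwise-sum recurrence, entrywise
theorem pvF_pascal (a : List Int) (r i : Nat) :
    pvF a r i + pvF a r (i + 1) = pvF a (r + 1) i := by
  unfold pvF
  rw [Finset.sum_range_succ' (fun j => ((r+1).choose j : Int) * a.getD (i + j) 0) (r+1)]
  rw [Finset.sum_range_succ' (fun j => (r.choose j : Int) * a.getD (i + j) 0) r]
  have h2 : ∑ j ∈ Finset.range (r + 1), ((r.choose j : Int)) * a.getD (i + 1 + j) 0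
      = ∑ j ∈ Finset.range (r + 1), ((r.choose j : Int)) * a.getD (i + (j + 1)) 0 := by
    apply Finset.sum_congr rfl; intro j _; ring_nf
  rw [h2]
  have h3 : ∑ j ∈ Finset.range (r + 1), (((r+1).choose (j+1) : Int)) * a.getD (i + (j + 1)) 0
      = ∑ j ∈ Finset.range (r + 1), ((r.choose j : Int)) * a.getD (i + (j + 1)) 0
        + ∑ j ∈ Finset.range (r + 1), ((r.choose (j+1) : Int)) * a.getD (i + (j + 1)) 0 := by
    rw [← Finset.sum_add_distrib]
    apply Finset.sum_congr rfl; intro j _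
    rw [Nat.choose_succ_succ]
    push_cast; ring
  have h4 : ∑ j ∈ Finset.range (r + 1), ((r.choose (j+1) : Int)) * a.getD (i + (j + 1)) 0
      = ∑ j ∈ Finset.range r, ((r.choose (j+1) : Int)) * a.getD (i + (j + 1)) 0 := by
    rw [Finset.sum_range_succ]; simp
  rw [h3, h4]
  simp
  ring

theorem pvRowF_getD (a : List Int) (r k : Nat) (hk : k < a.length - r) :
    (pvRowF a r).getD k 0 = pvF a r k := by
  rw [pvRowF, List.getD_eq_getElem?_getD]
  rw [List.getElem?_map, List.getElem?_range hk]
  simp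

-- the pairwise-sum step maps B's row r to B's row r + 1
theorem pvNext_rowF (a : List Int) (r : Nat) :
    pvNext (pvRowF a r) = pvRowF a (r + 1) := by
  apply List.ext_getElem
  · rw [pvNext_length, pvRowF_length, pvRowF_length]; omega
  · intro k h1 h2
    rw [pvNext_length, pvRowF_length] at h1
    unfold pvNext
    rw [List.getElem_map, PySem.List.getElem_pyRange_one]
    have hk1 : (0:Int) + (k:Int) = ((k:Nat):Int) := by ring
    have hk2 : (k:Int) + 1 = ((k+1:Nat):Int) := by push_cast; ring
    rw [hk1, hk2, PySem.List.pyGetD_natCast, PySem.List.pyGetD_natCast]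
    rw [pvRowF_getD a r k (by omega), pvRowF_getD a r (k+1) (by omega)]
    rw [pvF_pascal]
    have h2' : k < a.length - (r+1) := by rw [pvRowF_length] at h2; omega
    have hgd := pvRowF_getD a (r+1) k h2'
    rw [List.getD_eq_getElem?_getD, List.getElem?_eq_getElem h2] at hgd
    have h3 : (pvRowF a (r + 1))[k] = pvF a (r+1) k := by simpa using hgd
    rw [h3]

theorem pvLoop_spec (a : List Int) (k : Nat) :
    ∀ (r : Nat) (acc : List (List Int)), a.length - 1 = r + k →
      pvLoop acc (pvRowF a r) = acc ++ (List.range' (r + 1) k).map (fun s => pvRowF a s) := by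
  induction k with
  | zero =>
    intro r acc h
    rw [pvLoop, if_neg (by rw [pvRowF_length]; omega)]
    simp
  | succ k ih =>
    intro r acc h
    rw [pvLoop, if_pos (by rw [pvRowF_length]; omega)]
    rw [pvNext_rowF, ih (r+1) _ (by omega), List.range'_succ, List.map_cons]
    simp

-- B's append-loop, as prefix ++ map
theorem pv_solve_alt_eq (n : Int) (a : List Int) :
    solve_alt n a = [a] ++ (List.range' 1 (a.length - 1)).map (fun r => pvRowF a r) := by
  unfold solve_alt
  rw [PySem.List.foldl_append_singleton_eq_map]
  simp [pvRowB_eq_F]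

-- ===== VERDICT (by name: the statement is the Claim_ definition above) =====
theorem solve_spec : Claim_equal_solve := by
  intro n a _
  unfold Spec_solve solve
  rw [pv_solve_alt_eq]
  have h := pvLoop_spec a (a.length - 1) 0 [a] (by omega)
  rw [pvRowF_zero] at h
  simpa using h
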